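-- pv_equiv track=rewrite | github.com/khakaa/algorithm-study | deokryong/프로그래머스/Level1/[1차] 비밀지도.py | solution
-- ===== SOURCE A (Python) =====
-- def solution(n, arr1, arr2):
--     answer = [''] * n
--     #1단계 - 지도 1 해독
--     temp_arr1 = [(['']*n) for i in range(n)]
--
--     for i in range(n):
--         temp = arr1[i]
--         st = ''
--         while temp != 0:
--             div, mod = divmod(temp,2)
--             temp = div
--             st += str(mod)
--         while len(st) != n:
--             st+='0'
--         for j in range(n):
--             if st[n-j-1] == '0':
--                 temp_arr1[i][j] = ''
--             else:
--                 temp_arr1[i][j] = '#'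
--
--     #2단계 - 지도 2 해독
--     temp_arr2 = [(['']*n) for i in range(n)]
--
--     for i in range(n):
--         temp = arr2[i]
--         st = ''
--         while temp != 0:
--             div, mod = divmod(temp,2)
--             temp = div
--             st += str(mod)
--         while len(st) != n:
--             st+='0'
--         for j in range(n):
--             if st[n-j-1] == '0':
--                 temp_arr2[i][j] = ''
--             else:
--                 temp_arr2[i][j] = '#'
--
--     #3단계 - 해독한 지도 겹치기
--     for i in range(n):
--         for j in range(n):
--             if temp_arr1[i][j] == '#' or temp_arr2[i][j] == '#':
--                 answer[i] += '#'
--             else: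
--                 answer[i] += ' '
--     return answer
-- ===== SOURCE B (Python) =====
-- def solution(n, arr1, arr2):
--     # Combine first (bitwise OR), then render each row directly by testing bits
--     # MSB-to-LSB; no intermediate character grids.
--     return [''.join('#' if (arr1[i] | arr2[i]) >> (n - 1 - k) & 1 else ' '
--                     for k in range(n))
--             for i in range(n)]
-- ===== Notes on version B (the rewrite author's own statement) =====
-- stated objective: simpler
-- what changed: B ORs the two row values first and renders each row in one pass by testing bits MSB-to-LSB, replacing A's two per-map division/padding decodes into intermediate character grids plus a third merging pass.
import Mathlib
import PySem

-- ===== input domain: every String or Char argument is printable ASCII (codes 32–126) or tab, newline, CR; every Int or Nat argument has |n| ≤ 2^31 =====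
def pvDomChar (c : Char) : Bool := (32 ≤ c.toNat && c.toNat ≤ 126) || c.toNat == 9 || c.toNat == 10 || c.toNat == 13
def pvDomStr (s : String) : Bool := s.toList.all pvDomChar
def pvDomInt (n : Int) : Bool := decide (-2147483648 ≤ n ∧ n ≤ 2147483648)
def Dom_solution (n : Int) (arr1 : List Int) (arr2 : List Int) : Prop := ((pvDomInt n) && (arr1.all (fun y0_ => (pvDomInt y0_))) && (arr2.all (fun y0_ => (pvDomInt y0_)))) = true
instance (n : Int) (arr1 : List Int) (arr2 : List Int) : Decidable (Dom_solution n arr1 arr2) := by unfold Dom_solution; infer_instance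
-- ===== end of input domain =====

-- B combines the two rows with one bitwise OR and renders each row directly by
-- testing bits MSB-to-LSB, eliminating A's two intermediate character grids
-- (objective: simpler).  Equivalence is about the return value only.

-- ===== PORT A =====
-- while temp != 0: div, mod = divmod(temp, 2); temp = div; st += str(mod)
def bitsLoopA (temp : Int) (st : List Char) : List Char :=
  if temp = 0 then st
  else if temp ≤ 0 then st  -- totality guard only: Python loops forever for temp < 0 (outside Pre_)
  else
    bitsLoopA (PySem.Int.floordiv temp 2) (st ++ PySem.Int.toChars (PySem.Int.mod temp 2))
termination_by temp.toNat
decreasing_by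
  rw [PySem.Int.floordiv_eq_ediv_of_pos (by omega)]
  omega

-- while len(st) != n: st += '0'
def padLoopA (n : Int) (st : List Char) : List Char :=
  if (st.length : Int) = n then st
  else if n ≤ (st.length : Int) then st  -- totality guard only: Python loops forever when len(st) > n (outside Pre_)
  else padLoopA n (st ++ ['0'])
termination_by (n - st.length).toNat
decreasing_by
  simp only [List.length_append, List.length_cons, List.length_nil]
  omega

-- one iteration of A's decode loop: build st, then fill row cells '' / '#'
def decodeRowA (n : Int) (v : Int) : List String :=
  let st := padLoopA n (bitsLoopA v [])
  (PySem.List.pyRange 0 n 1).map (fun j =>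
    if PySem.List.pyGet? st (n - j - 1) = some '0' then "" else "#")

def solution (n : Int) (arr1 : List Int) (arr2 : List Int) : List String :=
  let temp_arr1 := (PySem.List.pyRange 0 n 1).map (fun i => decodeRowA n (PySem.List.pyGetD arr1 i 0))
  let temp_arr2 := (PySem.List.pyRange 0 n 1).map (fun i => decodeRowA n (PySem.List.pyGetD arr2 i 0))
  (PySem.List.pyRange 0 n 1).map (fun i =>
    String.ofList ((PySem.List.pyRange 0 n 1).foldl (fun acc j =>
      acc ++ (if PySem.List.pyGetD (PySem.List.pyGetD temp_arr1 i []) j "" = "#"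
                 ∨ PySem.List.pyGetD (PySem.List.pyGetD temp_arr2 i []) j "" = "#"
              then ['#'] else [' '])) []))

-- ===== PORT B =====
def solution_alt (n : Int) (arr1 : List Int) (arr2 : List Int) : List String :=
  (PySem.List.pyRange 0 n 1).map (fun i =>
    String.ofList ((PySem.List.pyRange 0 n 1).map (fun k =>
      if PySem.Int.band ((PySem.Int.bor (PySem.List.pyGetD arr1 i 0) (PySem.List.pyGetD arr2 i 0)) >>> (n - 1 - k).toNat) 1 ≠ 0
      then '#' else ' ')))

-- ===== PRECONDITION & SPEC =====
-- Pre_ excludes inputs where A raises IndexError (fewer than n rows) or loops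
-- forever (a row value negative or ≥ 2^n, so the padding loop never reaches length n).
def Pre_solution (n : Int) (arr1 : List Int) (arr2 : List Int) : Prop :=
  n.toNat ≤ arr1.length ∧ n.toNat ≤ arr2.length ∧
  (∀ x ∈ arr1.take n.toNat, 0 ≤ x ∧ x < 2 ^ n.toNat) ∧
  (∀ x ∈ arr2.take n.toNat, 0 ≤ x ∧ x < 2 ^ n.toNat)
instance (n : Int) (arr1 : List Int) (arr2 : List Int) : Decidable (Pre_solution n arr1 arr2) := by unfold Pre_solution; infer_instance

def pvWitness_solution : Int × List Int × List Int := (2, [1, 2], [3, 0])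

def Spec_solution (n : Int) (arr1 : List Int) (arr2 : List Int) (out : List String) : Prop := out = solution_alt n arr1 arr2
instance (n : Int) (arr1 : List Int) (arr2 : List Int) (out : List String) : Decidable (Spec_solution n arr1 arr2 out) := by unfold Spec_solution; infer_instance

-- ===== CLAIM (what is proved, stated in full; the proofs are below) =====
def Claim_equal_solution : Prop := ∀ (n : Int) (arr1 : List Int) (arr2 : List Int), Dom_solution n arr1 arr2 → Pre_solution n arr1 arr2 → Spec_solution n arr1 arr2 (solution n arr1 arr2)

-- ===== LEMMAS AND PROOFS =====

-- little-endian binary digits of a natural number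
def bitsLE (v : Nat) : List Char :=
  if v = 0 then [] else (if v % 2 = 1 then '1' else '0') :: bitsLE (v / 2)

theorem bitsLoopA_eq (v : Nat) (st : List Char) :
    bitsLoopA (v : Int) st = st ++ bitsLE v := by
  induction v using Nat.strong_induction_on generalizing st with
  | _ v ih =>
    rw [bitsLoopA, bitsLE]
    by_cases h0 : v = 0
    · simp [h0]
    · have hpos : ¬ ((v : Int) = 0) := by exact_mod_cast h0
      have hle : ¬ ((v : Int) ≤ 0) := by omega
      simp only [hpos, hle, if_false, h0]
      have hfd : PySem.Int.floordiv (v : Int) 2 = ((v / 2 : Nat) : Int) := by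
        exact_mod_cast PySem.Int.floordiv_natCast v 2
      have hmd : PySem.Int.mod (v : Int) 2 = ((v % 2 : Nat) : Int) := by
        exact_mod_cast PySem.Int.mod_natCast v 2
      rw [hfd, hmd, ih (v / 2) (by omega)]
      have c0 : PySem.Int.toChars (0:Int) = ['0'] := by decide
      have c1 : PySem.Int.toChars (1:Int) = ['1'] := by decide
      have h2 : v % 2 = 0 ∨ v % 2 = 1 := by omega
      rcases h2 with h2 | h2 <;> rw [h2] <;> simp <;> first | rw [c0] | rw [c1]
      all_goals rfl

theorem bitsLE_getD (v j : Nat) :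
    (bitsLE v).getD j '0' = if v.testBit j then '1' else '0' := by
  induction v using Nat.strong_induction_on generalizing j with
  | _ v ih =>
    rw [bitsLE]
    by_cases h0 : v = 0
    · simp [h0]
    · simp only [h0, if_false]
      cases j with
      | zero => simp [Nat.testBit_zero]
      | succ j =>
        simp only [List.getD_cons_succ]
        rw [ih (v / 2) (by omega) j, Nat.testBit_add_one]

theorem bitsLE_length_le (v m : Nat) (h : v < 2 ^ m) : (bitsLE v).length ≤ m := by
  induction v using Nat.strong_induction_on generalizing m with
  | _ v ih =>
    rw [bitsLE]
    by_cases h0 : v = 0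
    · simp [h0]
    · simp only [h0, if_false, List.length_cons]
      have hm : m ≠ 0 := by
        rintro rfl; simp at h; omega
      have : v / 2 < 2 ^ (m - 1) := by
        have : 2 ^ m = 2 ^ (m - 1) * 2 := by
          rw [← pow_succ]; congr 1; omega
        omega
      have := ih (v / 2) (by omega) (m - 1) this
      omega

theorem padLoopA_eq (n : Int) (st : List Char) (h : (st.length : Int) ≤ n) :
    padLoopA n st = st ++ List.replicate (n.toNat - st.length) '0' := by
  have hk : ∃ k : Nat, (k : Int) = n - st.length := ⟨(n - st.length).toNat, by omega⟩
  obtain ⟨k, hk⟩ := hk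
  induction k generalizing st with
  | zero =>
    rw [padLoopA]
    have : (st.length : Int) = n := by omega
    simp [this]
  | succ k ih =>
    rw [padLoopA]
    have h1 : ¬ ((st.length : Int) = n) := by omega
    have h2 : ¬ (n ≤ (st.length : Int)) := by omega
    simp only [h1, h2, if_false]
    rw [ih (st ++ ['0']) (by simp; omega) (by simp; omega)]
    have : n.toNat - st.length = (n.toNat - (st ++ ['0']).length) + 1 := by
      simp; omega
    rw [this, List.append_assoc]
    congr 1

-- the fully padded bit string A builds for one row value
theorem stA_spec (n : Int) (v : Nat) (hn : 0 ≤ n) (hvlt : v < 2 ^ n.toNat) :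
    (padLoopA n (bitsLoopA (v : Int) [])).length = n.toNat ∧
    ∀ j : Nat, j < n.toNat →
      (padLoopA n (bitsLoopA (v : Int) [])).getD j '0' =
        if v.testBit j then '1' else '0' := by
  have hlen := bitsLE_length_le v n.toNat hvlt
  rw [bitsLoopA_eq, List.nil_append, padLoopA_eq n _ (by omega)]
  constructor
  · simp; omega
  · intro j hj
    by_cases hjl : j < (bitsLE v).length
    · rw [List.getD_append _ _ _ _ hjl, bitsLE_getD]
    · rw [List.getD_append_right _ _ _ _ (by omega)]
      have hb := bitsLE_getD v j
      rw [List.getD_eq_default _ _ (by omega)] at hb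
      rw [← hb]
      simp [List.getD]

theorem castShift (x s : Nat) : ((x:Int) >>> s) = ((x >>> s : Nat) : Int) := rfl

theorem bandTest (a b : Nat) (s : Nat) :
    (PySem.Int.band ((PySem.Int.bor (a:Int) (b:Int)) >>> s) 1 ≠ 0) ↔ ((a ||| b).testBit s) := by
  rw [show ((1:Int) = ((1:Nat):Int)) from rfl]
  rw [PySem.Int.bor_natCast, castShift, PySem.Int.band_natCast]
  rw [Nat.cast_ne_zero]
  rw [Nat.and_one_is_mod, Nat.shiftRight_eq_div_pow, Nat.testBit, Nat.one_and_eq_mod_two, Nat.shiftRight_eq_div_pow]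
  simp

theorem pushIte (c : Prop) [Decidable c] :
    (if c then (['#'] : List Char) else [' ']) = [if c then '#' else ' '] := by
  split <;> rfl

theorem rowVal_spec (n : Int) (v : Int) (hn : 0 < n) (hv : 0 ≤ v)
    (hlt : v < 2 ^ n.toNat) (j : Int) (h0 : 0 ≤ j) (hj : j < n) :
    PySem.List.pyGetD (decodeRowA n v) j "" =
      if (v.toNat).testBit (n - j - 1).toNat then "#" else "" := by
  have hv' : v = ((v.toNat : Nat) : Int) := by omega
  have hvlt : v.toNat < 2 ^ n.toNat := by
    rw [hv'] at hlt; exact_mod_cast hlt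
  obtain ⟨hlen, hget⟩ := stA_spec n v.toNat (by omega) hvlt
  unfold decodeRowA
  rw [PySem.List.pyGetD_map_pyRange_of_nonneg _ _ _ _ h0 hj]
  have he0 : (0:Int) ≤ n - j - 1 := by omega
  have helt : (n - j - 1).toNat < n.toNat := by omega
  rw [hv', PySem.List.pyGet?_of_nonneg _ he0]
  rw [List.getElem?_eq_getElem (by omega : (n-j-1).toNat < (padLoopA n (bitsLoopA ((v.toNat:Nat):Int) [])).length)]
  rw [show (padLoopA n (bitsLoopA ((v.toNat:Nat):Int) []))[(n-j-1).toNat] =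
      (padLoopA n (bitsLoopA ((v.toNat:Nat):Int) [])).getD (n-j-1).toNat '0' by
    rw [List.getD_eq_getElem _ _ (by omega)]]
  rw [hget _ helt]
  rw [Int.toNat_natCast]
  by_cases hb : v.toNat.testBit (n - j - 1).toNat
  · rw [if_pos hb, if_pos hb, if_neg (show ¬((some '1') = some '0') by decide)]
  · rw [if_neg hb, if_neg hb, if_pos rfl]

-- ===== VERDICT (by name: the statement is the Claim_ definition above) =====
theorem solution_spec : Claim_equal_solution := by
  intro n arr1 arr2 hdom hpre
  obtain ⟨h1, h2, hb1, hb2⟩ := hpre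
  unfold Spec_solution solution solution_alt
  apply List.map_congr_left
  intro i hi
  rw [PySem.List.mem_pyRange_one] at hi
  obtain ⟨hi0, hin⟩ := hi
  have hn : 0 < n := by omega
  congr 1
  rw [PySem.List.pyGetD_map_pyRange_of_nonneg _ _ _ _ hi0 hin,
      PySem.List.pyGetD_map_pyRange_of_nonneg _ _ _ _ hi0 hin]
  simp only [pushIte]
  rw [PySem.List.foldl_append_singleton_eq_map, List.nil_append]
  apply List.map_congr_left
  intro j hj
  rw [PySem.List.mem_pyRange_one] at hj
  obtain ⟨hj0, hjn⟩ := hj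
  -- the two row values and their bounds
  have hmem1 : PySem.List.pyGetD arr1 i 0 ∈ arr1.take n.toNat := by
    rw [PySem.List.pyGetD_eq_getElem _ _ hi0 (by omega)]
    have hlt : i.toNat < (arr1.take n.toNat).length := by simp; omega
    have := List.getElem_mem hlt
    rwa [List.getElem_take] at this
  have hmem2 : PySem.List.pyGetD arr2 i 0 ∈ arr2.take n.toNat := by
    rw [PySem.List.pyGetD_eq_getElem _ _ hi0 (by omega)]
    have hlt : i.toNat < (arr2.take n.toNat).length := by simp; omega
    have := List.getElem_mem hlt
    rwa [List.getElem_take] at this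
  obtain ⟨ha0, halt⟩ := hb1 _ hmem1
  obtain ⟨hc0, hclt⟩ := hb2 _ hmem2
  rw [rowVal_spec n _ hn ha0 halt j hj0 hjn, rowVal_spec n _ hn hc0 hclt j hj0 hjn]
  have hone : n - 1 - j = n - j - 1 := by ring
  rw [hone]
  have hAcast : PySem.List.pyGetD arr1 i 0 = (((PySem.List.pyGetD arr1 i 0).toNat : Nat) : Int) := by omega
  have hCcast : PySem.List.pyGetD arr2 i 0 = (((PySem.List.pyGetD arr2 i 0).toNat : Nat) : Int) := by omega
  rw [hAcast, hCcast]  -- only affects B side occurrences? also A side already rewritten to toNat form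
  rw [show (if PySem.Int.band
        ((PySem.Int.bor (((PySem.List.pyGetD arr1 i 0).toNat : Nat) : Int) (((PySem.List.pyGetD arr2 i 0).toNat : Nat) : Int)) >>> (n - j - 1).toNat) 1 ≠ 0
      then '#' else ' ')
      = (if ((PySem.List.pyGetD arr1 i 0).toNat ||| (PySem.List.pyGetD arr2 i 0).toNat).testBit (n - j - 1).toNat then '#' else ' ') by
    by_cases hb : ((PySem.List.pyGetD arr1 i 0).toNat ||| (PySem.List.pyGetD arr2 i 0).toNat).testBit (n - j - 1).toNat
    · rw [if_pos hb, if_pos ((bandTest _ _ _).mpr hb)]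
    · rw [if_neg hb, if_neg (fun hx => hb ((bandTest _ _ _).mp hx))]]
  rw [Nat.testBit_lor, Int.toNat_natCast, Int.toNat_natCast]
  cases ht1 : ((PySem.List.pyGetD arr1 i 0).toNat).testBit (n - j - 1).toNat <;>
    cases ht2 : ((PySem.List.pyGetD arr2 i 0).toNat).testBit (n - j - 1).toNat <;>
    decide
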